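-- pv_equiv track=rewrite | github.com/Ayamansour7/Assignment-2 | question 6.py | list_jumps
-- ===== SOURCE A (Python) =====
-- def list_jumps(jumps):
--     index = 0   # Variable to store the current index
--     visited = set()   # Set to store visited indices
--     # Continue the game until the index is out-of-bounds or a cycle is detected
--     while index >= 0 and index < len(jumps):
--         if index in visited:   # If the current index has been visited before
--             return "cycle"   # Return "cycle"
--         visited.add(index)   # Add the current index to the visited set
--         index += jumps[index]   # Move to the next index based on the jump value
--     return "out-of-bounds"   # Return "out-of-bounds" if the index is out-of-bounds
-- ===== SOURCE B (Python) =====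
-- def list_jumps(jumps):
--     # O(1)-space pigeonhole simulation folded over a fixed step count:
--     # thread an optional position through len(jumps)+1 steps; it becomes None
--     # the moment the walk leaves bounds.  If it survives all steps, some index
--     # repeated (only len(jumps) distinct in-bounds indices exist), so: cycle.
--     pos = 0
--     for _ in range(len(jumps) + 1):
--         if pos is not None:
--             pos = pos + jumps[pos] if 0 <= pos < len(jumps) else None
--     return "out-of-bounds" if pos is None else "cycle"
-- ===== Notes on version B (the rewrite author's own statement) =====
-- stated objective: alternative
-- what changed: Drops the visited-set entirely: B threads an optional position through exactly len(jumps)+1 steps (None once out of bounds); by pigeonhole a position still alive after n+1 in-bounds steps must have repeated, so it reports 'cycle' in O(1) space.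
import Mathlib
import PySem

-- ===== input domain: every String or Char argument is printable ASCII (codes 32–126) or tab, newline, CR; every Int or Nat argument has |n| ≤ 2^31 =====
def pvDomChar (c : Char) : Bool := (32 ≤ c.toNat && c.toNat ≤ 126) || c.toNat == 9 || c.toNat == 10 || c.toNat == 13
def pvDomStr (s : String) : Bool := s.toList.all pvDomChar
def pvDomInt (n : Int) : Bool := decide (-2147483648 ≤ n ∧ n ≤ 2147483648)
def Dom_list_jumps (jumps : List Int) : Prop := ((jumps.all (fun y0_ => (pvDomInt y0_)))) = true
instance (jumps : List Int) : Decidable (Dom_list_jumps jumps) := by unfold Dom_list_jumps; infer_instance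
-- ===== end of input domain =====

-- B drops A's visited-set: it folds an optional position through n+1 pigeonhole-bounded steps in O(1) space (objective: alternative).

-- ===== PORT A =====
-- A's while loop; fuel = jumps.length + 1 only makes the recursion total: the
-- visited set holds distinct in-range indices, so the fuel can never run out
-- (proved below); the fuel-0 value is therefore arbitrary.
def list_jumps_loop (jumps : List Int) (fuel : Nat) (index : Int) (visited : PySem.Set Int) : String :=
  match fuel with
  | 0 => "cycle"
  | f + 1 =>
    if 0 ≤ index ∧ index < (jumps.length : Int) then
      if PySem.Set.contains visited index then "cycle"
      else
        list_jumps_loop jumps f (index + (PySem.List.pyGet? jumps index).getD 0)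
          (PySem.Set.add visited index)
    else "out-of-bounds"

def list_jumps (jumps : List Int) : String :=
  list_jumps_loop jumps (jumps.length + 1) 0 PySem.Set.empty

-- ===== PORT B =====
-- B's for-loop over range(n+1) threading an optional position (None = already
-- out of bounds), ported as a foldl over List.range (n+1).
def list_jumps_alt (jumps : List Int) : String :=
  match (List.range (jumps.length + 1)).foldl
      (fun pos _ =>
        pos.bind (fun i =>
          if 0 ≤ i ∧ i < (jumps.length : Int) then some (i + (PySem.List.pyGet? jumps i).getD 0)
          else none))
      (some 0) with
  | some _ => "cycle"
  | none => "out-of-bounds"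

-- ===== PRECONDITION & SPEC =====
def Spec_list_jumps (jumps : List Int) (out : String) : Prop := out = list_jumps_alt jumps
instance (jumps : List Int) (out : String) : Decidable (Spec_list_jumps jumps out) := by unfold Spec_list_jumps; infer_instance

-- ===== CLAIM (what is proved, stated in full; the proofs are below) =====
def Claim_equal_list_jumps : Prop := ∀ (jumps : List Int), Dom_list_jumps jumps → Spec_list_jumps jumps (list_jumps jumps)

-- ===== LEMMAS AND PROOFS =====

-- the one-step move i ↦ i + jumps[i], and the in-bounds predicate
def pvStep (jumps : List Int) (i : Int) : Int := i + (PySem.List.pyGet? jumps i).getD 0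
abbrev pvInB (jumps : List Int) (i : Int) : Prop := 0 ≤ i ∧ i < (jumps.length : Int)

-- B's fold body as a function on Option Int
def pvF (jumps : List Int) (pos : Option Int) : Option Int :=
  pos.bind (fun i => if 0 ≤ i ∧ i < (jumps.length : Int) then some (pvStep jumps i) else none)

-- invariant of A's loop: every visited index is in bounds and steps to another
-- visited index or to the current index
def pvInv (jumps : List Int) (v : List Int) (i : Int) : Prop :=
  ∀ x ∈ v, pvInB jumps x ∧ (pvStep jumps x ∈ v ∨ pvStep jumps x = i)

lemma pv_card_bound (jumps : List Int) (v : List Int) (hn : v.Nodup)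
    (hb : ∀ x ∈ v, pvInB jumps x) : v.length ≤ jumps.length := by
  have hsub : v.toFinset ⊆ Finset.Ico (0 : Int) (jumps.length : Int) := by
    intro x hx
    have := hb x (List.mem_toFinset.mp hx)
    simpa [Finset.mem_Ico] using this
  have := Finset.card_le_card hsub
  simpa [List.toFinset_card_of_nodup hn, Int.card_Ico] using this

-- if the current index was visited, the whole forward orbit stays inside the
-- visited set, hence in bounds
lemma pv_orbit_in_v (jumps : List Int) (v : List Int) (i : Int)
    (hI : pvInv jumps v i) (hi : i ∈ v) : ∀ k, (pvStep jumps)^[k] i ∈ v := by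
  intro k
  induction k with
  | zero => simpa using hi
  | succ k ih =>
    rw [Function.iterate_succ_apply']
    rcases (hI _ ih).2 with h | h
    · exact h
    · rw [h]; exact hi

lemma pvA_cycle (jumps : List Int) :
    ∀ (f : Nat) (i : Int) (v : List Int), v.Nodup → pvInv jumps v i →
      jumps.length + 1 ≤ v.length + f →
      (∀ k < f, pvInB jumps ((pvStep jumps)^[k] i)) →
      list_jumps_loop jumps f i v = "cycle" := by
  intro f
  induction f with
  | zero =>
    intro i v hn hI hlen _
    exact absurd (pv_card_bound jumps v hn fun x hx => (hI x hx).1) (by omega)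
  | succ f ih =>
    intro i v hn hI hlen hsafe
    have hib : 0 ≤ i ∧ i < (jumps.length : Int) := by
      have := hsafe 0 (Nat.succ_pos f); simpa [pvInB] using this
    rw [list_jumps_loop, if_pos hib]
    by_cases hmem : i ∈ v
    · rw [if_pos ((PySem.Set.contains_iff v i).mpr hmem)]
    · rw [if_neg (by simpa [PySem.Set.contains_iff] using hmem)]
      have hadd : PySem.Set.add v i = v ++ [i] := PySem.Set.add_of_not_mem hmem
      rw [hadd]
      apply ih
      · simp only [List.nodup_append, List.nodup_singleton, true_and, hn]
        intro a ha b hb; simp only [List.mem_singleton] at hb; subst hb; exact fun h => hmem (h ▸ ha)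
      · intro x hx
        rcases List.mem_append.mp hx with hx | hx
        · refine ⟨(hI x hx).1, ?_⟩
          rcases (hI x hx).2 with h | h
          · exact Or.inl (List.mem_append.mpr (Or.inl h))
          · exact Or.inl (by simp [h])
        · simp only [List.mem_singleton] at hx
          subst hx
          exact ⟨hib, Or.inr rfl⟩
      · simp; omega
      · intro k hk
        have := hsafe (k + 1) (by omega)
        simpa [Function.iterate_succ_apply, pvStep] using this

lemma pvA_cycle_safe (jumps : List Int) :
    ∀ (f : Nat) (i : Int) (v : List Int), v.Nodup → pvInv jumps v i →
      jumps.length + 1 ≤ v.length + f →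
      list_jumps_loop jumps f i v = "cycle" →
      ∀ k, pvInB jumps ((pvStep jumps)^[k] i) := by
  intro f
  induction f with
  | zero =>
    intro i v hn hI hlen _
    exact absurd (pv_card_bound jumps v hn fun x hx => (hI x hx).1) (by omega)
  | succ f ih =>
    intro i v hn hI hlen hres k
    rw [list_jumps_loop] at hres
    by_cases hib : 0 ≤ i ∧ i < (jumps.length : Int)
    · rw [if_pos hib] at hres
      by_cases hmem : i ∈ v
      · exact (hI _ (pv_orbit_in_v jumps v i hI hmem k)).1
      · rw [if_neg (by simpa [PySem.Set.contains_iff] using hmem),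
            PySem.Set.add_of_not_mem hmem] at hres
        have hnext : ∀ k, pvInB jumps ((pvStep jumps)^[k] (pvStep jumps i)) := by
          refine ih (pvStep jumps i) (v ++ [i]) ?_ ?_ (by simp; omega) (by simpa [pvStep] using hres)
          · simp only [List.nodup_append, List.nodup_singleton, true_and, hn]
            intro a ha b hb; simp only [List.mem_singleton] at hb; subst hb; exact fun h => hmem (h ▸ ha)
          · intro x hx
            rcases List.mem_append.mp hx with hx | hx
            · refine ⟨(hI x hx).1, ?_⟩
              rcases (hI x hx).2 with h | h
              · exact Or.inl (List.mem_append.mpr (Or.inl h))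
              · exact Or.inl (by simp [h])
            · simp only [List.mem_singleton] at hx
              subst hx
              exact ⟨hib, Or.inr rfl⟩
        cases k with
        | zero => simpa using hib
        | succ k => simpa [Function.iterate_succ_apply] using hnext k
    · rw [if_neg hib] at hres
      exact absurd hres (by decide)

lemma pvA_total (jumps : List Int) :
    ∀ (f : Nat) (i : Int) (v : List Int),
      list_jumps_loop jumps f i v = "cycle" ∨ list_jumps_loop jumps f i v = "out-of-bounds" := by
  intro f
  induction f with
  | zero => intro i v; exact Or.inl rfl
  | succ f ih =>
    intro i v
    rw [list_jumps_loop]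
    split
    · split
      · exact Or.inl rfl
      · exact ih _ _
    · exact Or.inr rfl

-- B's fold over range ignores the element, so it is an iterate of pvF
lemma pvB_fold_iterate (jumps : List Int) :
    ∀ (l : List Nat) (s : Option Int),
      l.foldl (fun pos _ =>
        pos.bind (fun i =>
          if 0 ≤ i ∧ i < (jumps.length : Int) then some (i + (PySem.List.pyGet? jumps i).getD 0)
          else none)) s = (pvF jumps)^[l.length] s := by
  intro l
  induction l with
  | nil => intro s; rfl
  | cons a l ih =>
    intro s
    rw [List.foldl_cons, List.length_cons, Function.iterate_succ_apply, ih]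
    rfl

lemma pvF_none (jumps : List Int) : ∀ (f : Nat), (pvF jumps)^[f] (none : Option Int) = none := by
  intro f
  induction f with
  | zero => rfl
  | succ f ih => rw [Function.iterate_succ_apply]; exact ih

-- characterisation of the iterated fold body on a live position
lemma pvF_char (jumps : List Int) :
    ∀ (f : Nat) (i : Int),
      (pvF jumps)^[f] (some i) =
        if ∀ k < f, pvInB jumps ((pvStep jumps)^[k] i) then some ((pvStep jumps)^[f] i)
        else none := by
  intro f
  induction f with
  | zero =>
    intro i
    rw [if_pos]
    · rfl
    · intro k hk; exact absurd hk (Nat.not_lt_zero k)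
  | succ f ih =>
    intro i
    rw [Function.iterate_succ_apply]
    by_cases hib : 0 ≤ i ∧ i < (jumps.length : Int)
    · have hF : pvF jumps (some i) = some (pvStep jumps i) := by
        simp [pvF, hib]
      rw [hF, ih]
      by_cases hall : ∀ k < f, pvInB jumps ((pvStep jumps)^[k] (pvStep jumps i))
      · rw [if_pos hall, if_pos, Function.iterate_succ_apply]
        intro k hk
        cases k with
        | zero => simpa using hib
        | succ k =>
          have := hall k (by omega)
          simpa [Function.iterate_succ_apply] using this
      · rw [if_neg hall, if_neg]
        intro hall'
        apply hall
        intro k hk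
        have := hall' (k + 1) (by omega)
        simpa [Function.iterate_succ_apply] using this
    · have hF : pvF jumps (some i) = none := by simp [pvF, hib]
      rw [hF, pvF_none, if_neg]
      intro hall
      exact hib (by simpa using hall 0 (Nat.succ_pos f))

lemma pvB_char (jumps : List Int) :
    list_jumps_alt jumps =
      if ∀ k < jumps.length + 1, pvInB jumps ((pvStep jumps)^[k] 0) then "cycle"
      else "out-of-bounds" := by
  unfold list_jumps_alt
  rw [pvB_fold_iterate, List.length_range, pvF_char]
  by_cases hP : ∀ k < jumps.length + 1, pvInB jumps ((pvStep jumps)^[k] 0)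
  · rw [if_pos hP, if_pos hP]
  · rw [if_neg hP, if_neg hP]

-- ===== VERDICT (by name: the statement is the Claim_ definition above) =====
theorem list_jumps_spec : Claim_equal_list_jumps := by
  intro jumps _
  unfold Spec_list_jumps list_jumps
  rw [pvB_char]
  by_cases hP : ∀ k < jumps.length + 1, pvInB jumps ((pvStep jumps)^[k] 0)
  · rw [if_pos hP]
    exact pvA_cycle jumps (jumps.length + 1) 0 PySem.Set.empty List.nodup_nil
      (by intro x hx; simp [PySem.Set.empty] at hx) (by simp) hP
  · rw [if_neg hP]
    rcases pvA_total jumps (jumps.length + 1) 0 PySem.Set.empty with h | h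
    · exact absurd (fun k _ => pvA_cycle_safe jumps (jumps.length + 1) 0 PySem.Set.empty
        List.nodup_nil (by intro x hx; simp [PySem.Set.empty] at hx) (by simp) h k) hP
    · exact h
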